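-- pv_equiv track=rewrite | github.com/paulklemstine/factor | lean/books/TRIANGLESWALLOWEDUNIVERSE6/book/convert_md_to_latex.py | protect_math_pipes
-- ===== SOURCE A (Python) =====
-- def protect_math_pipes(text):
--     """Replace | inside $...$ with a placeholder before table parsing."""
--     result = []
--     in_math = False
--     i = 0
--     while i < len(text):
--         ch = text[i]
--         if ch == '$' and (i == 0 or text[i-1] != '\\'):
--             in_math = not in_math
--             result.append(ch)
--         elif ch == '|' and in_math:
--             result.append('\x01PIPE\x01')
--         else:
--             result.append(ch)
--         i += 1
--     return ''.join(result)
-- ===== SOURCE B (Python) =====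
-- PLACEHOLDER = '\x01PIPE\x01'
--
--
-- def protect_math_pipes(text):
--     """Replace | inside $...$ with a placeholder before table parsing."""
--     n = len(text)
--     delims = [i for i in range(n)
--               if text[i] == '$' and (i == 0 or text[i-1] != '\\')]
--
--     def in_math(i):
--         return sum(1 for d in delims if d < i) % 2 == 1
--
--     return ''.join(PLACEHOLDER if text[i] == '|' and in_math(i) else text[i]
--                    for i in range(n))
-- ===== Notes on version B (the rewrite author's own statement) =====
-- stated objective: alternative
-- what changed: Replaces the stateful single-pass toggle with a two-phase scheme: first an index table of all unescaped dollar-delimiter positions, then a stateless rebuild that replaces a pipe character exactly when an odd number of delimiter positions precede it.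
import Mathlib
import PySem

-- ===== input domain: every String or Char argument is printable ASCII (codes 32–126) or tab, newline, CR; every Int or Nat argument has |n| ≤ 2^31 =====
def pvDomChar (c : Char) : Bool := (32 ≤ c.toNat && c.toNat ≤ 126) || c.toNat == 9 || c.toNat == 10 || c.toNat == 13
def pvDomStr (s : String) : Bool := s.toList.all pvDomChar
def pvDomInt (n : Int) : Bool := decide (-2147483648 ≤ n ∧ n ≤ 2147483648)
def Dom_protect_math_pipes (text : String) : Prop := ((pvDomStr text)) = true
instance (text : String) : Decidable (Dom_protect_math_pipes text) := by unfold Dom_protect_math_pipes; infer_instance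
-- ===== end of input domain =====

-- B replaces A's stateful toggle pass by an index table of unescaped '$' positions
-- plus a stateless parity-based rebuild (objective: alternative).

-- ===== PORT A =====
-- A's while loop: index i, toggle flag in_math, result list of appended strings.
def pvA_loop (cs : List Char) (i : Nat) (in_math : Bool) (result : List String) : List String :=
  if i < cs.length then
    let ch := cs.getD i ' '
    if ch = '$' ∧ (i = 0 ∨ cs.getD (i - 1) ' ' ≠ '\\') then
      pvA_loop cs (i + 1) (!in_math) (result ++ [ch.toString])
    else if ch = '|' ∧ in_math then
      pvA_loop cs (i + 1) in_math (result ++ ["\x01PIPE\x01"])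
    else
      pvA_loop cs (i + 1) in_math (result ++ [ch.toString])
  else result
termination_by cs.length - i

def protect_math_pipes (text : String) : String :=
  String.join (pvA_loop text.toList 0 false [])

-- ===== PORT B =====
-- the unescaped-'$' test (same predicate as A's branch condition)
abbrev pvDelim (cs : List Char) (i : Nat) : Prop :=
  cs.getD i ' ' = '$' ∧ (i = 0 ∨ cs.getD (i - 1) ' ' ≠ '\\')

def protect_math_pipes_alt (text : String) : String :=
  let cs := text.toList
  let n := cs.length
  let delims := (List.range n).filter (fun i => decide (pvDelim cs i))
  let inMath := fun i => (delims.countP (fun d => decide (d < i))) % 2 == 1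
  String.join ((List.range n).map (fun i =>
    if cs.getD i ' ' = '|' ∧ inMath i = true then "\x01PIPE\x01"
    else (cs.getD i ' ').toString))

-- ===== PRECONDITION & SPEC =====
def Spec_protect_math_pipes (text : String) (out : String) : Prop := out = protect_math_pipes_alt text
instance (text : String) (out : String) : Decidable (Spec_protect_math_pipes text out) := by unfold Spec_protect_math_pipes; infer_instance

-- ===== CLAIM (what is proved, stated in full; the proofs are below) =====
def Claim_equal_protect_math_pipes : Prop := ∀ (text : String), Dom_protect_math_pipes text → Spec_protect_math_pipes text (protect_math_pipes text)

-- ===== LEMMAS AND PROOFS =====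

-- B's in_math flag, as a function of the index
def pvInMath (cs : List Char) (i : Nat) : Bool :=
  (((List.range cs.length).filter (fun j => decide (pvDelim cs j))).countP
    (fun d => decide (d < i))) % 2 == 1

-- B's per-index output
def pvOut (cs : List Char) (i : Nat) : String :=
  if cs.getD i ' ' = '|' ∧ pvInMath cs i = true then "\x01PIPE\x01"
  else (cs.getD i ' ').toString

lemma pvCountLT (cs : List Char) (i : Nat) (h : i ≤ cs.length) :
    ((List.range cs.length).filter (fun j => decide (pvDelim cs j))).countP
      (fun d => decide (d < i))
      = (List.range i).countP (fun j => decide (pvDelim cs j)) := by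
  rw [List.countP_filter]
  have hn : cs.length = i + (cs.length - i) := by omega
  rw [hn, List.range_add, List.countP_append]
  have h2 : ((List.range (cs.length - i)).map (fun x => i + x)).countP
      (fun a => decide (a < i) && decide (pvDelim cs a)) = 0 := by
    rw [List.countP_eq_zero]
    intro a ha
    simp only [List.mem_map] at ha
    obtain ⟨x, _, rfl⟩ := ha
    simp
  rw [h2, Nat.add_zero]
  apply List.countP_congr
  intro a ha
  simp only [List.mem_range] at ha
  simp [ha]

lemma pvInMath_succ (cs : List Char) (i : Nat) (h : i < cs.length) :
    pvInMath cs (i + 1)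
      = if pvDelim cs i then !(pvInMath cs i) else pvInMath cs i := by
  unfold pvInMath
  rw [pvCountLT cs i (by omega), pvCountLT cs (i + 1) (by omega)]
  rw [List.range_succ, List.countP_append]
  by_cases hd : pvDelim cs i
  · rw [if_pos hd]
    rw [List.countP_cons_of_pos (by simpa using hd), List.countP_nil]
    generalize (List.countP (fun j => decide (pvDelim cs j)) (List.range i)) = c
    rcases Nat.mod_two_eq_zero_or_one c with he | he <;>
      simp [Nat.add_mod, he]
  · rw [if_neg hd]
    rw [List.countP_cons_of_neg (by simpa using hd), List.countP_nil, Nat.add_zero]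

lemma pvA_loop_eq (cs : List Char) :
    ∀ (k i : Nat) (m : Bool) (result : List String),
      cs.length - i = k → m = pvInMath cs i →
      pvA_loop cs i m result
        = result ++ (List.range' i (cs.length - i)).map (pvOut cs) := by
  intro k
  induction k with
  | zero =>
    intro i m result hk hm
    unfold pvA_loop
    rw [if_neg (by omega)]
    simp [hk]
  | succ k ih =>
    intro i m result hk hm
    have hi : i < cs.length := by omega
    have hrange : (List.range' i (cs.length - i)) = i :: List.range' (i+1) (cs.length - (i+1)) := by
      have : cs.length - i = (cs.length - (i+1)) + 1 := by omega
      rw [this, List.range'_succ]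
    unfold pvA_loop
    rw [if_pos hi]
    by_cases hd : pvDelim cs i
    · rw [if_pos (by exact hd)]
      rw [ih (i+1) (!m) _ (by omega) (by rw [hm, pvInMath_succ cs i hi, if_pos hd])]
      rw [hrange]
      simp only [List.map_cons, List.append_assoc, List.singleton_append]
      congr 1
      congr 1
      unfold pvOut
      have : ¬ (cs.getD i ' ' = '|' ∧ pvInMath cs i = true) := by
        intro ⟨h1, _⟩
        have := hd.1
        rw [h1] at this
        exact absurd this (by decide)
      rw [if_neg this]
    · rw [if_neg (by exact hd)]
      have hm' : m = pvInMath cs (i+1) := by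
        rw [hm, pvInMath_succ cs i hi, if_neg hd]
      by_cases hp : cs.getD i ' ' = '|' ∧ m = true
      · rw [if_pos hp]
        rw [ih (i+1) m _ (by omega) hm']
        rw [hrange]
        simp only [List.map_cons, List.append_assoc, List.singleton_append]
        congr 1
        congr 1
        unfold pvOut
        rw [if_pos ⟨hp.1, by rw [← hm]; exact hp.2⟩]
      · rw [if_neg hp]
        rw [ih (i+1) m _ (by omega) hm']
        rw [hrange]
        simp only [List.map_cons, List.append_assoc, List.singleton_append]
        congr 1
        congr 1
        unfold pvOut
        have : ¬ (cs.getD i ' ' = '|' ∧ pvInMath cs i = true) := by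
          intro ⟨h1, h2⟩
          exact hp ⟨h1, by rw [hm]; exact h2⟩
        rw [if_neg this]

lemma pvInMath_zero (cs : List Char) : pvInMath cs 0 = false := by
  unfold pvInMath
  have : (((List.range cs.length).filter (fun j => decide (pvDelim cs j))).countP
      (fun d => decide (d < 0))) = 0 := by
    rw [List.countP_eq_zero]; intro a _; simp
  rw [this]
  rfl

-- ===== VERDICT (by name: the statement is the Claim_ definition above) =====
theorem protect_math_pipes_spec : Claim_equal_protect_math_pipes := by
  intro text _
  unfold Spec_protect_math_pipes protect_math_pipes protect_math_pipes_alt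
  rw [pvA_loop_eq text.toList (text.toList.length) 0 false [] (by omega)
      (by rw [pvInMath_zero])]
  simp only [List.nil_append, Nat.sub_zero, ← List.range_eq_range']
  refine congrArg String.join (List.map_congr_left ?_)
  intro i _
  simp only [pvOut, pvInMath]
  rfl
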